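-- pv_equiv track=rewrite | github.com/sueszli/vector-database-benchmark | dataset/python-mutated/loop_with_function_call_test.py | while_with_local_call_in_cond
-- ===== SOURCE A (Python) =====
-- def while_with_local_call_in_cond(n):
--     if False:
--         return 10
--
--     def local_fn(x):
--         if False:
--             while True:
--                 i = 10
--         return x * 3
--     i = 0
--     s = 0
--     while i < local_fn(n):
--         s = s * 10 + i
--         i += 1
--     return s
-- ===== SOURCE B (Python) =====
-- def while_with_local_call_in_cond(n):
--     m = 3 * n
--     s, p = 0, 1
--     for i in reversed(range(m)):
--         s += i * p
--         p *= 10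
--     return s
-- ===== Notes on version B (the rewrite author's own statement) =====
-- stated objective: alternative
-- what changed: Replaces the forward Horner-style accumulation s = s*10 + i over an incrementing while loop by a back-to-front pass over reversed(range(3*n)) that maintains a (sum, running power of ten) pair and adds i * power at each step.
import Mathlib
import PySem

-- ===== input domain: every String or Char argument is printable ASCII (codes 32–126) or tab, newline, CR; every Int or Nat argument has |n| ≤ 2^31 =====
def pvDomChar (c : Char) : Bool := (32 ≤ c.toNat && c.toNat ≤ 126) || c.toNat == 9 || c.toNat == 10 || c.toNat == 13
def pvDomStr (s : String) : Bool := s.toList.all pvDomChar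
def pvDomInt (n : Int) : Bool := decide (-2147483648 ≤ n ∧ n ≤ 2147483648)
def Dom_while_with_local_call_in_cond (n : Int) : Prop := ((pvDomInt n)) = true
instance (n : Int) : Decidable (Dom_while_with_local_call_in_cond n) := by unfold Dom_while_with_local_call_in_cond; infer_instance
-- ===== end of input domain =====

-- B replaces A's forward carry-forward loop (s = s*10 + i) by a back-to-front pass over
-- reversed(range(3n)) that adds i times a running power of ten — an alternative single pass
-- with different state (sum, power) and opposite traversal order.

-- ===== PORT A =====
-- local_fn(x) = x * 3 (its dead branches do nothing)
def pvLocalFn (x : Int) : Int := x * 3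

-- the while loop: while i < local_fn(n): s = s*10 + i; i += 1
def pvLoopA (n i s : Int) : Int :=
  if i < pvLocalFn n then pvLoopA n (i + 1) (s * 10 + i) else s
termination_by (pvLocalFn n - i).toNat
decreasing_by omega

def while_with_local_call_in_cond (n : Int) : Int :=
  pvLoopA n 0 0

-- ===== PORT B =====
def while_with_local_call_in_cond_alt (n : Int) : Int :=
  let m := 3 * n
  ((PySem.List.pyRange 0 m 1).reverse.foldl
    (fun (sp : Int × Int) i => (sp.1 + i * sp.2, sp.2 * 10)) (0, 1)).1

-- ===== PRECONDITION & SPEC =====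
def Spec_while_with_local_call_in_cond (n : Int) (out : Int) : Prop := out = while_with_local_call_in_cond_alt n
instance (n : Int) (out : Int) : Decidable (Spec_while_with_local_call_in_cond n out) := by unfold Spec_while_with_local_call_in_cond; infer_instance

-- ===== CLAIM (what is proved, stated in full; the proofs are below) =====
def Claim_equal_while_with_local_call_in_cond : Prop := ∀ (n : Int), Dom_while_with_local_call_in_cond n → Spec_while_with_local_call_in_cond n (while_with_local_call_in_cond n)

-- ===== LEMMAS AND PROOFS =====

-- weighted positional value of a digit list: pvW [d0, …, dk] = Σ dj * 10^(k-j)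
def pvW : List Int → Int
  | [] => 0
  | x :: xs => x * 10 ^ xs.length + pvW xs

-- A's loop invariant: the running accumulator shifts left past the remaining positions
theorem pvLoopA_eq (n : Int) : ∀ (k : Nat) (i s : Int), (pvLocalFn n - i).toNat = k →
    pvLoopA n i s = s * 10 ^ k + pvW (PySem.List.pyRange i (3 * n) 1) := by
  intro k
  induction k with
  | zero =>
    intro i s hk
    have hempty : PySem.List.pyRange i (3 * n) 1 = [] := by
      simp [PySem.List.pyRange]; simp [pvLocalFn] at hk; omega
    rw [pvLoopA, if_neg (by simp [pvLocalFn] at hk ⊢; omega)]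
    simp [hempty, pvW]
  | succ k ih =>
    intro i s hk
    have hlt : i < 3 * n := by simp [pvLocalFn] at hk; omega
    rw [pvLoopA, if_pos (by simpa [pvLocalFn, mul_comm] using hlt)]
    rw [ih (i + 1) (s * 10 + i) (by simp [pvLocalFn] at hk ⊢; omega)]
    rw [PySem.List.pyRange_one_cons hlt]
    have hlen : (PySem.List.pyRange (i + 1) (3 * n) 1).length = k := by
      rw [PySem.List.length_pyRange_one]; simp [pvLocalFn] at hk; omega
    simp [pvW, hlen, pow_succ]
    ring

-- B's loop invariant: folding from the back accumulates pvW scaled by the incoming power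
theorem pvFoldB_eq : ∀ (l : List Int) (s p : Int),
    l.reverse.foldl (fun (sp : Int × Int) i => (sp.1 + i * sp.2, sp.2 * 10)) (s, p)
      = (s + p * pvW l, p * 10 ^ l.length) := by
  intro l
  induction l with
  | nil => intro s p; simp [pvW]
  | cons x xs ih =>
    intro s p
    rw [List.reverse_cons, List.foldl_append, ih]
    simp only [List.foldl_cons, List.foldl_nil, pvW, List.length_cons, pow_succ]
    simp only [Prod.mk.injEq]
    constructor <;> ring

theorem while_with_local_call_in_cond_eq (n : Int) :
    while_with_local_call_in_cond n = while_with_local_call_in_cond_alt n := by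
  have h := pvFoldB_eq (PySem.List.pyRange 0 (3 * n) 1) 0 1
  unfold while_with_local_call_in_cond while_with_local_call_in_cond_alt
  rw [pvLoopA_eq n ((pvLocalFn n - 0).toNat) 0 0 rfl]
  simp only [h]
  simp

-- ===== VERDICT (by name: the statement is the Claim_ definition above) =====
theorem while_with_local_call_in_cond_spec : Claim_equal_while_with_local_call_in_cond := by
  intro n _
  exact while_with_local_call_in_cond_eq n
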